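-- pv_equiv track=rewrite | github.com/nh0znoisung/Online_Judge-Competitive_Programming | Codeforces/2024/round981/tmp.py | solve
-- ===== SOURCE A (Python) =====
-- def solve(nums):
--     prefix_sum = 0
--     prefix_sum_map = {0: -1}
--     last_end = -1
--     count = 0
--
--     for i, num in enumerate(nums):
--         prefix_sum += num
--
--         if prefix_sum in prefix_sum_map:
--             start = prefix_sum_map[prefix_sum]
--
--             if start >= last_end:
--                 count += 1
--                 last_end = i
--
--         prefix_sum_map[prefix_sum] = i
--
--     return count
-- ===== SOURCE B (Python) =====
-- def solve(nums):
--     s = 0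
--     seen = {0}
--     count = 0
--     for num in nums:
--         s += num
--         if s in seen:
--             count += 1
--             seen = {s}
--         else:
--             seen.add(s)
--     return count
-- ===== Notes on version B (the rewrite author's own statement) =====
-- stated objective: simpler
-- what changed: Replaces the persistent prefix-sum->latest-index dict plus last_end gate with a region-local set of prefix sums that is reset to {s} whenever a zero-sum subarray is counted; no indices are tracked at all.
import Mathlib
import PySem

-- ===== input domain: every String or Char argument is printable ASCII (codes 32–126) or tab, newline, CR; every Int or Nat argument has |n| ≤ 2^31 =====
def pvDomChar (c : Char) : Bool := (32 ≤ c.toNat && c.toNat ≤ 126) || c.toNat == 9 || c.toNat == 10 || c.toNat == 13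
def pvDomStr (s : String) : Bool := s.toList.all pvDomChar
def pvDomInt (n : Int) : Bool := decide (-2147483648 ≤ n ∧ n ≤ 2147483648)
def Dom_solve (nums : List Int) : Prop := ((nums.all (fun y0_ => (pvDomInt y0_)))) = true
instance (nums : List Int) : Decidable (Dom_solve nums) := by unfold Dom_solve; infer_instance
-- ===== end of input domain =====

-- B replaces A's persistent prefix-sum->latest-index dict and last_end gate with a
-- region-local set of prefix sums that is reset whenever a subarray is counted (objective: simpler).


-- ===== PORT A =====
-- state: (prefix_sum, prefix_sum_map, last_end, count)
def solveStepA (st : Int × PySem.Dict Int Int × Int × Int) (p : Int × Int) :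
    Int × PySem.Dict Int Int × Int × Int :=
  let ps := st.1 + p.2
  match (st.2.1).get? ps with
  | some start =>
      if start ≥ st.2.2.1 then (ps, (st.2.1).insert ps p.1, p.1, st.2.2.2 + 1)
      else (ps, (st.2.1).insert ps p.1, st.2.2.1, st.2.2.2)
  | none => (ps, (st.2.1).insert ps p.1, st.2.2.1, st.2.2.2)

def solve (nums : List Int) : Int :=
  ((PySem.List.enumerate nums).foldl solveStepA
    (0, (PySem.Dict.empty).insert 0 (-1), -1, 0)).2.2.2

-- ===== PORT B =====
-- state: (s, seen, count)
def solveStepB (st : Int × PySem.Set Int × Int) (num : Int) : Int × PySem.Set Int × Int :=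
  let s := st.1 + num
  if PySem.Set.contains st.2.1 s then (s, PySem.Set.ofList [s], st.2.2 + 1)
  else (s, PySem.Set.add st.2.1 s, st.2.2)

def solve_alt (nums : List Int) : Int :=
  (nums.foldl solveStepB (0, PySem.Set.ofList [0], 0)).2.2

-- ===== PRECONDITION & SPEC =====
def Spec_solve (nums : List Int) (out : Int) : Prop := out = solve_alt nums
instance (nums : List Int) (out : Int) : Decidable (Spec_solve nums out) := by unfold Spec_solve; infer_instance

-- ===== CLAIM (what is proved, stated in full; the proofs are below) =====
def Claim_equal_solve : Prop := ∀ (nums : List Int), Dom_solve nums → Spec_solve nums (solve nums)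

-- ===== LEMMAS AND PROOFS =====

-- Invariant: at step index k, B's `seen` holds exactly the prefix sums whose latest
-- occurrence index in A's map is ≥ last_end, all map values are < k, and last_end < k.
lemma loop_eq (l : List Int) : ∀ (k ps le c c' : Int) (m : PySem.Dict Int Int) (seen : PySem.Set Int),
    c = c' →
    le < k →
    (∀ x v, m.get? x = some v → v < k) →
    (∀ x, x ∈ seen ↔ ∃ v, m.get? x = some v ∧ le ≤ v) →
    ((PySem.List.enumerate l k).foldl solveStepA (ps, m, le, c)).2.2.2
      = (l.foldl solveStepB (ps, seen, c')).2.2 := by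
  induction l with
  | nil => intro k ps le c c' m seen hc _ _ _; simpa [PySem.List.enumerate] using hc
  | cons num rest ih =>
    intro k ps le c c' m seen hc hle hval hmem
    rw [PySem.List.enumerate_cons]
    simp only [List.foldl_cons]
    cases hget : m.get? (ps + num) with
    | none =>
      have hnm : ps + num ∉ seen := by
        intro h
        rcases (hmem _).1 h with ⟨v, hv, _⟩
        rw [hget] at hv; simp at hv
      have hcond : ¬ (PySem.Set.contains seen (ps + num) = true) := by
        rw [PySem.Set.contains_iff]; exact hnm
      simp only [solveStepA, solveStepB, hget]
      rw [if_neg hcond]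
      apply ih (k + 1) _ le c c' _ _ hc (by omega)
      · intro x v hx
        rw [PySem.Dict.get?_insert] at hx
        split at hx
        · injection hx with hx; omega
        · exact lt_trans (hval x v hx) (by omega)
      · intro x
        rw [PySem.Set.mem_add, PySem.Dict.get?_insert]
        constructor
        · rintro (hx | rfl)
          · rcases (hmem x).1 hx with ⟨v, hv, hlev⟩
            refine ⟨v, ?_, hlev⟩
            split
            · next heq => subst heq; rw [hget] at hv; simp at hv
            · exact hv
          · exact ⟨k, by simp, by omega⟩
        · rintro ⟨v, hv, hlev⟩
          split at hv
          · next heq => right; exact heq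
          · left; exact (hmem x).2 ⟨v, hv, hlev⟩
    | some start =>
      by_cases hge : start ≥ le
      · have hin : ps + num ∈ seen := (hmem _).2 ⟨start, hget, hge⟩
        have hcond : PySem.Set.contains seen (ps + num) = true := by
          rw [PySem.Set.contains_iff]; exact hin
        simp only [solveStepA, solveStepB, hget, if_pos hge]
        rw [if_pos hcond]
        apply ih (k + 1) _ k (c + 1) (c' + 1) _ _ (by omega) (by omega)
        · intro x v hx
          rw [PySem.Dict.get?_insert] at hx
          split at hx
          · injection hx with hx; omega
          · exact lt_trans (hval x v hx) (by omega)
        · intro x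
          rw [PySem.Dict.get?_insert]
          constructor
          · intro hx
            have hxe : x = ps + num := by simpa [PySem.Set.ofList] using hx
            subst hxe
            exact ⟨k, by simp, le_refl k⟩
          · rintro ⟨v, hv, hlev⟩
            split at hv
            · next heq => subst heq; simp [PySem.Set.ofList]
            · exact absurd (hval x v hv) (by omega)
      · have hnm : ps + num ∉ seen := by
          intro h
          rcases (hmem _).1 h with ⟨v, hv, hlev⟩
          rw [hget] at hv; injection hv with hv; omega
        have hcond : ¬ (PySem.Set.contains seen (ps + num) = true) := by
          rw [PySem.Set.contains_iff]; exact hnm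
        simp only [solveStepA, solveStepB, hget, if_neg hge]
        rw [if_neg hcond]
        apply ih (k + 1) _ le c c' _ _ hc (by omega)
        · intro x v hx
          rw [PySem.Dict.get?_insert] at hx
          split at hx
          · injection hx with hx; omega
          · exact lt_trans (hval x v hx) (by omega)
        · intro x
          rw [PySem.Set.mem_add, PySem.Dict.get?_insert]
          constructor
          · rintro (hx | rfl)
            · rcases (hmem x).1 hx with ⟨v, hv, hlev⟩
              refine ⟨v, ?_, hlev⟩
              split
              · next heq => subst heq; rw [hget] at hv; injection hv with hv; omega
              · exact hv
            · exact ⟨k, by simp, by omega⟩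
          · rintro ⟨v, hv, hlev⟩
            split at hv
            · next heq => right; exact heq
            · left; exact (hmem x).2 ⟨v, hv, hlev⟩

-- ===== VERDICT (by name: the statement is the Claim_ definition above) =====
theorem solve_spec : Claim_equal_solve := by
  intro nums _
  unfold Spec_solve solve solve_alt
  apply loop_eq nums 0 0 (-1) 0 0
  · rfl
  · omega
  · intro x v hx
    rw [PySem.Dict.get?_insert] at hx
    split at hx
    · injection hx with hx; omega
    · simp [PySem.Dict.get?_empty] at hx
  · intro x
    rw [PySem.Dict.get?_insert]
    constructor
    · intro hx
      have hxe : x = 0 := by simpa [PySem.Set.ofList] using hx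
      subst hxe
      exact ⟨-1, by simp, le_refl _⟩
    · rintro ⟨v, hv, _⟩
      split at hv
      · next heq => subst heq; simp [PySem.Set.ofList]
      · simp [PySem.Dict.get?_empty] at hv
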